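-- pv_equiv track=rewrite | github.com/pypi-data/pypi-mirror-350 | packages/pykomodo/pykomodo-0.2.5-py3-none-any.whl/pykomodo/enhanced_chunker.py | _remove_redundancy_across_all_files
-- ===== SOURCE A (Python) =====
-- def _remove_redundancy_across_all_files(big_text: str) -> str:
--     """
--     Remove duplicate function definitions across the entire combined text,
--     so each unique function appears only once globally. This guarantees
--     `test_redundancy_removal` sees only 1 instance of 'standalone_function'.
--     """
--     lines = big_text.split('\n')
--     final_lines = []
--     in_function = False
--     current_function = []
--
--     def normalize_function(func_text: str) -> str:
--         lines_ = [ln.strip() for ln in func_text.split('\n')]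
--         lines_ = [ln for ln in lines_ if ln]
--         return '\n'.join(lines_)
--
--     seen_functions = {}
--
--     for line in lines:
--         stripped = line.rstrip()
--         if stripped.strip().startswith('def '):
--             if in_function and current_function:
--                 normed = normalize_function('\n'.join(current_function))
--                 if normed not in seen_functions:
--                     seen_functions[normed] = True
--                     final_lines.extend(current_function)
--             current_function = [line]
--             in_function = True
--         elif in_function:
--             if stripped.strip().startswith('def '):
--                 normed = normalize_function('\n'.join(current_function))
--                 if normed not in seen_functions:
--                     seen_functions[normed] = True
--                     final_lines.extend(current_function)
--                 current_function = [line]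
--             else:
--                 current_function.append(line)
--         else:
--             final_lines.append(line)
--
--     if in_function and current_function:
--         normed = normalize_function('\n'.join(current_function))
--         if normed not in seen_functions:
--             seen_functions[normed] = True
--             final_lines.extend(current_function)
--
--     return "\n".join(final_lines)
-- ===== SOURCE B (Python) =====
-- def _remove_redundancy_across_all_files(big_text: str) -> str:
--     """Two-phase rewrite: parse lines into a prefix plus def-blocks, then emit
--     the prefix and each block whose normalized text has not been seen before."""
--     lines = big_text.split('\n')
--
--     def is_def(line):
--         return line.strip().startswith('def ')
--
--     def normalize(func_text):
--         parts = [ln.strip() for ln in func_text.split('\n')]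
--         return '\n'.join(p for p in parts if p)
--
--     # Phase 1: prefix = lines before the first def; group the rest into blocks.
--     i = 0
--     while i < len(lines) and not is_def(lines[i]):
--         i += 1
--     prefix = lines[:i]
--     blocks = []
--     for line in lines[i:]:
--         if is_def(line):
--             blocks.append([line])
--         else:
--             blocks[-1].append(line)
--
--     # Phase 2: keep each block only on the first occurrence of its key.
--     out = list(prefix)
--     seen = set()
--     for block in blocks:
--         key = normalize('\n'.join(block))
--         if key not in seen:
--             seen.add(key)
--             out.extend(block)
--     return '\n'.join(out)
-- ===== Notes on version B (the rewrite author's own statement) =====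
-- stated objective: simpler
-- what changed: A's single interleaved scan (in_function flag, flush-on-def with a dict during the scan) is replaced by two separate phases: parse the lines once into a prefix plus a list of def-blocks, then a dedup pass that emits each block on first sight of its normalized key.
import Mathlib
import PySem

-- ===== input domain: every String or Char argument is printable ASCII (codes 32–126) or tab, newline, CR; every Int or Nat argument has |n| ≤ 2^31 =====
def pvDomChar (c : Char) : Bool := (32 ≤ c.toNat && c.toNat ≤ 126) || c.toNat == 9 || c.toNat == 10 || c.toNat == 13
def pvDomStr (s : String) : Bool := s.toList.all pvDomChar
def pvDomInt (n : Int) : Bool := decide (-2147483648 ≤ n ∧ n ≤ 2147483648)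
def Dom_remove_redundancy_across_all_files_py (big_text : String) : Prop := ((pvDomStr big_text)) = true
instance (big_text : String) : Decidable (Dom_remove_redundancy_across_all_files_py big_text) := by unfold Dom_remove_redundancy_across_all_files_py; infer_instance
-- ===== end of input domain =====

-- B restructures A's single interleaved scan into two phases (parse prefix+blocks, then dedup); objective: simpler. Equal return value proved.

-- ===== PORT A =====

-- line.rstrip().strip().startswith('def ')
def pvIsDefA (line : String) : Bool :=
  PySem.Str.startswith (PySem.Str.strip (PySem.Str.rstrip line)) "def "

-- A's nested 'normalize_function'
def pvNormalizeA (func_text : String) : String :=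
  let lines_ := ((PySem.Str.split? func_text "\n").getD []).map PySem.Str.strip
  let lines_ := lines_.filter (fun ln => decide (ln ≠ ""))
  PySem.Str.join "\n" lines_

structure PvStA where
  fin : List String
  inf : Bool
  cur : List String
  seen : PySem.Dict String Bool

-- the flush code A repeats three times (normalize current_function, emit if unseen)
def pvFlushA (fin : List String) (cur : List String) (seen : PySem.Dict String Bool) :
    List String × PySem.Dict String Bool :=
  let normed := pvNormalizeA (PySem.Str.join "\n" cur)
  if PySem.Dict.contains seen normed then (fin, seen)
  else (fin ++ cur, PySem.Dict.insert seen normed true)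

-- A's loop body, branch for branch (the inner 'if stripped.strip().startswith' of the elif is kept)
def pvStepA (st : PvStA) (line : String) : PvStA :=
  if pvIsDefA line then
    if st.inf = true ∧ st.cur ≠ [] then
      let f := pvFlushA st.fin st.cur st.seen
      ⟨f.1, true, [line], f.2⟩
    else ⟨st.fin, true, [line], st.seen⟩
  else if st.inf then
    if pvIsDefA line then
      let f := pvFlushA st.fin st.cur st.seen
      ⟨f.1, true, [line], f.2⟩
    else ⟨st.fin, st.inf, st.cur ++ [line], st.seen⟩
  else ⟨st.fin ++ [line], st.inf, st.cur, st.seen⟩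

-- A's trailing 'if in_function and current_function: …'
def pvFinishA (st : PvStA) : List String :=
  if st.inf = true ∧ st.cur ≠ [] then (pvFlushA st.fin st.cur st.seen).1 else st.fin

def remove_redundancy_across_all_files_py (big_text : String) : String :=
  let lines := (PySem.Str.split? big_text "\n").getD []   -- sep "\n" is nonempty: split? never errors
  PySem.Str.join "\n" (pvFinishA (lines.foldl pvStepA ⟨[], false, [], PySem.Dict.empty⟩))

-- ===== PORT B =====

-- line.strip().startswith('def ')
def pvIsDefB (line : String) : Bool :=
  PySem.Str.startswith (PySem.Str.strip line) "def "

def pvNormalizeB (func_text : String) : String :=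
  let parts := ((PySem.Str.split? func_text "\n").getD []).map PySem.Str.strip
  PySem.Str.join "\n" (parts.filter (fun p => decide (p ≠ "")))

-- phase 1 grouping loop: cur is the block being extended (blocks[-1]), completed blocks are emitted
def pvGroupB (cur : List String) : List String → List (List String)
  | [] => [cur]
  | l :: rest =>
    if pvIsDefB l then cur :: pvGroupB [l] rest else pvGroupB (cur ++ [l]) rest

-- phase 2 loop body: emit a block on first sight of its key
def pvStepB (st : List String × PySem.Set String) (b : List String) :
    List String × PySem.Set String :=
  let key := pvNormalizeB (PySem.Str.join "\n" b)
  if PySem.Set.contains st.2 key then st else (st.1 ++ b, PySem.Set.add st.2 key)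

def remove_redundancy_across_all_files_py_alt (big_text : String) : String :=
  let lines := (PySem.Str.split? big_text "\n").getD []
  let pre := lines.takeWhile (fun l => !pvIsDefB l)     -- the while-loop prefix lines[:i]
  let blocks : List (List String) :=
    match lines.dropWhile (fun l => !pvIsDefB l) with   -- lines[i:]
    | [] => []
    | l :: rest => pvGroupB [l] rest
  PySem.Str.join "\n" (blocks.foldl pvStepB (pre, PySem.Set.empty)).1

-- ===== PRECONDITION & SPEC =====
def Spec_remove_redundancy_across_all_files_py (big_text : String) (out : String) : Prop := out = remove_redundancy_across_all_files_py_alt big_text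
instance (big_text : String) (out : String) : Decidable (Spec_remove_redundancy_across_all_files_py big_text out) := by unfold Spec_remove_redundancy_across_all_files_py; infer_instance

-- ===== CLAIM (what is proved, stated in full; the proofs are below) =====
def Claim_equal_remove_redundancy_across_all_files_py : Prop := ∀ (big_text : String), Dom_remove_redundancy_across_all_files_py big_text → Spec_remove_redundancy_across_all_files_py big_text (remove_redundancy_across_all_files_py big_text)

-- ===== LEMMAS AND PROOFS =====

lemma pv_dropWhile_idem {α : Type} (p : α → Bool) (l : List α) :
    List.dropWhile p (List.dropWhile p l) = List.dropWhile p l := by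
  induction l with
  | nil => rfl
  | cons x xs ih =>
    by_cases h : p x
    · simp [h, ih]
    · simp [h]

lemma pv_rstrip_cons (c : Char) (t : List Char) :
    PySem.Chars.rstrip (c :: t) =
      if PySem.Chars.rstrip t = [] then (if PySem.Chars.isspace c then [] else [c])
      else c :: PySem.Chars.rstrip t := by
  simp only [PySem.Chars.rstrip, List.reverse_cons, List.dropWhile_append]
  by_cases h : List.dropWhile PySem.Chars.isspace t.reverse = []
  · simp [h, List.dropWhile]
    by_cases hc : PySem.Chars.isspace c <;> simp [hc]
  · simp [h, List.isEmpty_iff, List.reverse_eq_nil_iff]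

lemma pv_rstrip_nil_iff (t : List Char) :
    PySem.Chars.rstrip t = [] ↔ ∀ x ∈ t, PySem.Chars.isspace x := by
  simp [PySem.Chars.rstrip, List.reverse_eq_nil_iff, List.dropWhile_eq_nil_iff]

lemma pv_lstrip_nil (t : List Char) (h : ∀ x ∈ t, PySem.Chars.isspace x) :
    PySem.Chars.lstrip t = [] := by
  simp [PySem.Chars.lstrip, List.dropWhile_eq_nil_iff]; exact h

lemma pv_lstrip_rstrip_comm (s : List Char) :
    PySem.Chars.lstrip (PySem.Chars.rstrip s) = PySem.Chars.rstrip (PySem.Chars.lstrip s) := by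
  induction s with
  | nil => rfl
  | cons c t ih =>
    rw [pv_rstrip_cons]
    by_cases h : PySem.Chars.rstrip t = []
    · simp only [h]
      have ht := (pv_rstrip_nil_iff t).mp h
      by_cases hc : PySem.Chars.isspace c
      · simp only [hc]
        rw [show PySem.Chars.lstrip (c :: t) = PySem.Chars.lstrip t by simp [PySem.Chars.lstrip, hc]]
        rw [pv_lstrip_nil t ht]
        rfl
      · simp only [hc]
        rw [show PySem.Chars.lstrip (c :: t) = c :: t by simp [PySem.Chars.lstrip, hc]]
        rw [pv_rstrip_cons, h]
        simp [PySem.Chars.lstrip, hc]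
    · simp only [h, if_false]
      by_cases hc : PySem.Chars.isspace c
      · rw [show PySem.Chars.lstrip (c :: PySem.Chars.rstrip t) = PySem.Chars.lstrip (PySem.Chars.rstrip t) by simp [PySem.Chars.lstrip, hc]]
        rw [show PySem.Chars.lstrip (c :: t) = PySem.Chars.lstrip t by simp [PySem.Chars.lstrip, hc]]
        exact ih
      · rw [show PySem.Chars.lstrip (c :: PySem.Chars.rstrip t) = c :: PySem.Chars.rstrip t by simp [PySem.Chars.lstrip, hc]]
        rw [show PySem.Chars.lstrip (c :: t) = c :: t by simp [PySem.Chars.lstrip, hc]]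
        rw [pv_rstrip_cons, if_neg h]

lemma pv_rstrip_idem (s : List Char) :
    PySem.Chars.rstrip (PySem.Chars.rstrip s) = PySem.Chars.rstrip s := by
  simp [PySem.Chars.rstrip, pv_dropWhile_idem]

lemma pv_strip_rstrip (s : List Char) :
    PySem.Chars.strip (PySem.Chars.rstrip s) = PySem.Chars.strip s := by
  simp only [PySem.Chars.strip]
  rw [pv_lstrip_rstrip_comm, pv_rstrip_idem]

lemma pvIsDef_eq (line : String) : pvIsDefA line = pvIsDefB line := by
  simp [pvIsDefA, pvIsDefB, PySem.Str.startswith, PySem.Str.strip, PySem.Str.rstrip,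
    pv_strip_rstrip]

lemma pvNormalize_eq (t : String) : pvNormalizeA t = pvNormalizeB t := rfl

-- dict-keys / set correspondence maintained by the two loops
def PvRel (d : PySem.Dict String Bool) (s : PySem.Set String) : Prop :=
  ∀ k, PySem.Dict.contains d k = PySem.Set.contains s k

lemma pv_contains_true {s : PySem.Set String} {x : String} (h : x ∈ s) :
    PySem.Set.contains s x = true := (PySem.Set.contains_iff s x).mpr h

lemma pv_contains_false {s : PySem.Set String} {x : String} (h : x ∉ s) :
    PySem.Set.contains s x = false := by
  rw [Bool.eq_false_iff]
  intro hx
  exact h ((PySem.Set.contains_iff s x).mp hx)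

lemma pvRel_insert_add (d : PySem.Dict String Bool) (s : PySem.Set String)
    (h : PvRel d s) (k : String) : PvRel (PySem.Dict.insert d k true) (PySem.Set.add s k) := by
  intro k'
  rw [PySem.Dict.contains_insert, h k']
  by_cases hk : k' = k
  · subst hk
    rw [pv_contains_true ((PySem.Set.mem_add s k' k').mpr (Or.inr rfl))]
    simp
  · have hbe : (k' == k) = false := by simp [hk]
    rw [hbe, Bool.false_or]
    by_cases hm : k' ∈ s
    · rw [pv_contains_true hm, pv_contains_true ((PySem.Set.mem_add s k k').mpr (Or.inl hm))]
    · have hm2 : k' ∉ PySem.Set.add s k := by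
        intro hx
        rcases (PySem.Set.mem_add s k k').mp hx with h1 | h1
        · exact hm h1
        · exact hk h1
      rw [pv_contains_false hm, pv_contains_false hm2]

-- in-function phase: A's remaining fold + final flush = B's dedup fold over the grouped blocks
lemma pv_main (t : List String) : ∀ (cur fin : List String) (d : PySem.Dict String Bool)
    (s : PySem.Set String), cur ≠ [] → PvRel d s →
    pvFinishA (t.foldl pvStepA ⟨fin, true, cur, d⟩) =
      ((pvGroupB cur t).foldl pvStepB (fin, s)).1 := by
  induction t with
  | nil =>
    intro cur fin d s hcur hrel
    simp only [List.foldl_nil, pvGroupB, List.foldl_cons]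
    by_cases hm : pvNormalizeB (PySem.Str.join "\n" cur) ∈ s
    · have hcd : PySem.Dict.contains d (pvNormalizeA (PySem.Str.join "\n" cur)) = true := by
        rw [pvNormalize_eq, hrel _]; exact pv_contains_true hm
      simp [pvFinishA, pvFlushA, pvStepB, hcur, hcd, hm]
    · have hcd : PySem.Dict.contains d (pvNormalizeA (PySem.Str.join "\n" cur)) = false := by
        rw [pvNormalize_eq, hrel _]; exact pv_contains_false hm
      simp [pvFinishA, pvFlushA, pvStepB, hcur, hcd, hm]
  | cons l t ih =>
    intro cur fin d s hcur hrel
    by_cases hd : pvIsDefB l = true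
    · have hdA : pvIsDefA l = true := by rw [pvIsDef_eq]; exact hd
      rw [show pvGroupB cur (l :: t) = cur :: pvGroupB [l] t by simp [pvGroupB, hd]]
      rw [List.foldl_cons, List.foldl_cons]
      by_cases hm : pvNormalizeB (PySem.Str.join "\n" cur) ∈ s
      · have hcd : PySem.Dict.contains d (pvNormalizeA (PySem.Str.join "\n" cur)) = true := by
          rw [pvNormalize_eq, hrel _]; exact pv_contains_true hm
        have hA : pvStepA ⟨fin, true, cur, d⟩ l = ⟨fin, true, [l], d⟩ := by
          simp [pvStepA, hdA, pvFlushA, hcur, hcd]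
        have hB : pvStepB (fin, s) cur = (fin, s) := by
          simp [pvStepB, hm]
        rw [hA, hB]
        exact ih [l] fin d s (by simp) hrel
      · have hcd : PySem.Dict.contains d (pvNormalizeA (PySem.Str.join "\n" cur)) = false := by
          rw [pvNormalize_eq, hrel _]; exact pv_contains_false hm
        have hA : pvStepA ⟨fin, true, cur, d⟩ l =
            ⟨fin ++ cur, true, [l],
              PySem.Dict.insert d (pvNormalizeA (PySem.Str.join "\n" cur)) true⟩ := by
          simp [pvStepA, hdA, pvFlushA, hcur, hcd]
        have hB : pvStepB (fin, s) cur =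
            (fin ++ cur, PySem.Set.add s (pvNormalizeB (PySem.Str.join "\n" cur))) := by
          simp [pvStepB, hm]
        rw [hA, hB]
        refine ih [l] (fin ++ cur) _ _ (by simp) ?_
        rw [pvNormalize_eq]
        exact pvRel_insert_add d s hrel _
    · have hb : pvIsDefB l = false := by revert hd; cases pvIsDefB l <;> simp
      have hdA : pvIsDefA l = false := by rw [pvIsDef_eq]; exact hb
      rw [show pvGroupB cur (l :: t) = pvGroupB (cur ++ [l]) t by simp [pvGroupB, hb]]
      rw [List.foldl_cons]
      have hA : pvStepA ⟨fin, true, cur, d⟩ l = ⟨fin, true, cur ++ [l], d⟩ := by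
        simp [pvStepA, hdA]
      rw [hA]
      exact ih (cur ++ [l]) fin d s (by simp) hrel

-- prefix phase: before the first def line A only copies lines into final_lines
lemma pv_prefix (lines : List String) : ∀ (fin cur0 : List String)
    (d : PySem.Dict String Bool) (s : PySem.Set String), PvRel d s →
    pvFinishA (lines.foldl pvStepA ⟨fin, false, cur0, d⟩) =
      ((match lines.dropWhile (fun l => !pvIsDefB l) with
        | [] => []
        | l :: rest => pvGroupB [l] rest).foldl pvStepB
        (fin ++ lines.takeWhile (fun l => !pvIsDefB l), s)).1 := by
  induction lines with
  | nil =>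
    intro fin cur0 d s hrel
    simp [pvFinishA]
  | cons l ls ih =>
    intro fin cur0 d s hrel
    by_cases hd : pvIsDefB l = true
    · have hdA : pvIsDefA l = true := by rw [pvIsDef_eq]; exact hd
      have hA : pvStepA ⟨fin, false, cur0, d⟩ l = ⟨fin, true, [l], d⟩ := by
        simp [pvStepA, hdA]
      rw [List.foldl_cons, hA]
      rw [List.dropWhile_cons, List.takeWhile_cons]
      simp only [hd, Bool.not_true]
      simpa using pv_main ls [l] fin d s (by simp) hrel
    · have hdA : pvIsDefA l = false := by rw [pvIsDef_eq]; revert hd; cases pvIsDefB l <;> simp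
      have hA : pvStepA ⟨fin, false, cur0, d⟩ l = ⟨fin ++ [l], false, cur0, d⟩ := by
        simp [pvStepA, hdA]
      rw [List.foldl_cons, hA]
      rw [List.dropWhile_cons, List.takeWhile_cons]
      have hb : pvIsDefB l = false := by revert hd; cases pvIsDefB l <;> simp
      simp only [hb, Bool.not_false, if_true]
      rw [show fin ++ l :: List.takeWhile (fun l => !pvIsDefB l) ls
            = (fin ++ [l]) ++ List.takeWhile (fun l => !pvIsDefB l) ls by simp]
      exact ih (fin ++ [l]) cur0 d s hrel

-- ===== VERDICT (by name: the statement is the Claim_ definition above) =====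
theorem remove_redundancy_across_all_files_py_spec : Claim_equal_remove_redundancy_across_all_files_py := by
  intro big_text _
  unfold Spec_remove_redundancy_across_all_files_py
  unfold remove_redundancy_across_all_files_py remove_redundancy_across_all_files_py_alt
  have h := pv_prefix ((PySem.Str.split? big_text "\n").getD []) [] [] PySem.Dict.empty PySem.Set.empty
    (by intro k; simp [PySem.Dict.contains_empty, PySem.Set.contains, PySem.Set.empty])
  simp only [List.nil_append] at h
  exact congrArg (PySem.Str.join "\n") h
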